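-- pv_equiv track=rewrite | github.com/Ladvien/entity | src/entity/resources/sql_utils.py | _convert_placeholders
-- ===== SOURCE A (Python) =====
-- def _convert_placeholders(sql: str, style: str) -> str:
--     """Convert ``?`` placeholders in ``sql`` to match ``style``."""
--     if style in {"format", "pyformat"}:
--         return sql.replace("?", "%s")
--     if style == "numeric":
--         parts = sql.split("?")
--         if len(parts) == 1:
--             return sql
--         new = []
--         for index, part in enumerate(parts[:-1], start=1):
--             new.append(part)
--             new.append(f"${index}")
--         new.append(parts[-1])
--         return "".join(new)
--     return sql
-- ===== SOURCE B (Python) =====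
-- def _convert_placeholders(sql: str, style: str) -> str:
--     """Convert ``?`` placeholders in ``sql`` to match ``style``."""
--     if style in {"format", "pyformat"}:
--         return sql.replace("?", "%s")
--     if style == "numeric":
--         out = []
--         counter = 1
--         for ch in sql:
--             if ch == "?":
--                 out.append(f"${counter}")
--                 counter += 1
--             else:
--                 out.append(ch)
--         return "".join(out)
--     return sql
-- ===== Notes on version B (the rewrite author's own statement) =====
-- stated objective: alternative
-- what changed: The numeric branch no longer splits the SQL into parts and interleaves them with $-indices before joining; it is a single forward character scan carrying a counter that emits $<counter> at each '?'.
import Mathlib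
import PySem

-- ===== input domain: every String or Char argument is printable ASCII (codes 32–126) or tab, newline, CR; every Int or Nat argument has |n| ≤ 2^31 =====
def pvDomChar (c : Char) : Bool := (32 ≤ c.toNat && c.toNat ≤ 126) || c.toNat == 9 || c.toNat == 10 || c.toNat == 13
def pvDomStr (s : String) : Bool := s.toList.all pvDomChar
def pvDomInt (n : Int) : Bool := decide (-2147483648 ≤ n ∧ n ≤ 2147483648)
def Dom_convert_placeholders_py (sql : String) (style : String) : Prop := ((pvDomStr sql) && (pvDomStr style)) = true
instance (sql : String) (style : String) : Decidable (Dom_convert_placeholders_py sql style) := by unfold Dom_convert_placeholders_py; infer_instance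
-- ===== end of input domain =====

-- B rewrites the "numeric" branch as a single counter-carrying scan over the characters
-- instead of A's split-into-parts plus interleave-and-join; same return value (objective: alternative).


-- ===== PORT A =====
-- literal transliteration of _convert_placeholders: split on "?", then interleave the
-- parts with "$1","$2",… via enumerate/append and join with "".
def convert_placeholders_py (sql : String) (style : String) : String :=
  if style = "format" || style = "pyformat" then
    PySem.Str.replace sql "?" "%s"
  else if style = "numeric" then
    let parts := PySem.Chars.splitOn sql.toList ['?']
    if parts.length = 1 then
      sql
    else
      -- for index, part in enumerate(parts[:-1], start=1): new.append(part); new.append(f"${index}")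
      let newl := (PySem.List.enumerate (PySem.List.slice parts none (some (-1))) 1).foldl
        (fun acc (p : Int × List Char) => acc ++ [p.2, '$' :: PySem.Int.toChars p.1]) []
      -- new.append(parts[-1]); "".join(new)   (parts is never empty, so parts[-1] never raises)
      String.ofList (PySem.Chars.join [] (newl ++ [(PySem.List.pyGet? parts (-1)).getD []]))
  else
    sql

-- ===== PORT B =====
-- the scan of Source B: append each non-'?' char, replace each '?' by '$'+str(counter), counter += 1
def pvScanB : List Char → Int → List Char
  | [], _ => []
  | c :: r, i =>
    if c = '?' then ('$' :: PySem.Int.toChars i) ++ pvScanB r (i + 1)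
    else c :: pvScanB r i

def convert_placeholders_py_alt (sql : String) (style : String) : String :=
  if style = "format" || style = "pyformat" then
    PySem.Str.replace sql "?" "%s"
  else if style = "numeric" then
    String.ofList (pvScanB sql.toList 1)
  else
    sql

-- ===== PRECONDITION & SPEC =====
def Spec_convert_placeholders_py (sql : String) (style : String) (out : String) : Prop := out = convert_placeholders_py_alt sql style
instance (sql : String) (style : String) (out : String) : Decidable (Spec_convert_placeholders_py sql style out) := by unfold Spec_convert_placeholders_py; infer_instance

-- ===== CLAIM (what is proved, stated in full; the proofs are below) =====
def Claim_equal_convert_placeholders_py : Prop := ∀ (sql : String) (style : String), Dom_convert_placeholders_py sql style → Spec_convert_placeholders_py sql style (convert_placeholders_py sql style)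

-- ===== LEMMAS AND PROOFS =====

-- structural characterisation of splitting a char list on '?'
def pvSp : List Char → List (List Char)
  | [] => [[]]
  | c :: r => if c = '?' then [] :: pvSp r else (pvSp r).modifyHead (c :: ·)

theorem pvSp_ne_nil (cs : List Char) : pvSp cs ≠ [] := by
  cases cs with
  | nil => simp [pvSp]
  | cons c r =>
    simp only [pvSp]
    split
    · simp
    · cases h : pvSp r with
      | nil => exact absurd h (pvSp_ne_nil r)
      | cons p ps => simp

theorem pvSplitOn_go_eq (cs : List Char) : ∀ (fuel : Nat) (cur : List Char) (acc : List (List Char)),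
    cs.length ≤ fuel →
    PySem.Chars.splitOn.go ['?'] fuel cs cur acc
      = acc.reverse ++ (pvSp cs).modifyHead (cur.reverse ++ ·) := by
  induction cs with
  | nil =>
    intro fuel cur acc _
    cases fuel <;> simp [PySem.Chars.splitOn.go, pvSp]
  | cons c r ih =>
    intro fuel cur acc hf
    cases fuel with
    | zero => simp at hf
    | succ f =>
      by_cases hc : c = '?'
      · subst hc
        rw [show PySem.Chars.splitOn.go ['?'] (f+1) ('?' :: r) cur acc
              = PySem.Chars.splitOn.go ['?'] f r [] (cur.reverse :: acc) by
            simp [PySem.Chars.splitOn.go, List.isPrefixOf]]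
        rw [ih f [] (cur.reverse :: acc) (by simpa using hf)]
        simp [pvSp]
        cases pvSp r <;> simp
      · rw [show PySem.Chars.splitOn.go ['?'] (f+1) (c :: r) cur acc
              = PySem.Chars.splitOn.go ['?'] f r (c :: cur) acc by
            simp only [PySem.Chars.splitOn.go, List.isPrefixOf, Bool.and_true]
            simp only [beq_iff_eq]
            exact if_neg (fun h => hc h.symm)]
        rw [ih f (c :: cur) acc (by simpa using Nat.lt_succ_iff.mp (Nat.lt_of_lt_of_le (Nat.lt_succ_self _) (by simpa using hf)))]
        cases h : pvSp r with
        | nil => exact absurd h (pvSp_ne_nil r)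
        | cons p ps => simp [pvSp, hc, h]

theorem pvSplitOn_eq (cs : List Char) : PySem.Chars.splitOn cs ['?'] = pvSp cs := by
  rw [PySem.Chars.splitOn, pvSplitOn_go_eq cs (cs.length + 1) [] [] (Nat.le_succ _)]
  cases h : pvSp cs with
  | nil => exact absurd h (pvSp_ne_nil cs)
  | cons p ps => simp

theorem pvScanB_of_single (cs : List Char) : ∀ (i : Int), (pvSp cs).length = 1 → pvScanB cs i = cs := by
  induction cs with
  | nil => intro i _; rfl
  | cons c r ih =>
    intro i h
    by_cases hc : c = '?'
    · subst hc
      simp [pvSp] at h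
      exact absurd h (pvSp_ne_nil r)
    · simp only [pvSp, hc, ite_false, List.length_modifyHead] at h
      simp [pvScanB, hc, ih i h]

-- the interleaved list A builds from the parts
def pvInter : List (List Char) → Int → List (List Char)
  | [], _ => []
  | [p], _ => [p]
  | p :: q :: ps, i => p :: ('$' :: PySem.Int.toChars i) :: pvInter (q :: ps) (i + 1)

theorem pvInter_cons_head (c : Char) (p : List Char) (ps : List (List Char)) (i : Int) :
    (pvInter ((c :: p) :: ps) i).flatten = c :: (pvInter (p :: ps) i).flatten := by
  cases ps <;> simp [pvInter]

theorem pvJoin_inter (cs : List Char) : ∀ (i : Int),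
    (pvInter (pvSp cs) i).flatten = pvScanB cs i := by
  induction cs with
  | nil => intro i; simp [pvSp, pvInter, pvScanB]
  | cons c r ih =>
    intro i
    by_cases hc : c = '?'
    · subst hc
      cases h : pvSp r with
      | nil => exact absurd h (pvSp_ne_nil r)
      | cons p ps =>
        have := ih (i + 1)
        rw [h] at this
        simp [pvSp, h, pvInter, pvScanB, ← this]
    · cases h : pvSp r with
      | nil => exact absurd h (pvSp_ne_nil r)
      | cons p ps =>
        have := ih i
        rw [h] at this
        simp only [pvSp, hc, ite_false, h, List.modifyHead_cons, pvInter_cons_head, this]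
        simp [pvScanB, hc]

theorem pvFlatMap_last_eq_inter (parts : List (List Char)) : ∀ (h : parts ≠ []) (i : Int),
    (PySem.List.enumerate parts.dropLast i).flatMap
        (fun p : Int × List Char => [p.2, '$' :: PySem.Int.toChars p.1]) ++ [parts.getLast h]
      = pvInter parts i := by
  induction parts with
  | nil => intro h; exact absurd rfl h
  | cons p ps ih =>
    intro _ i
    cases ps with
    | nil => simp [pvInter]
    | cons q qs =>
      have hne : q :: qs ≠ [] := by simp
      rw [show (p :: q :: qs).dropLast = p :: (q :: qs).dropLast by simp [List.dropLast]]
      rw [PySem.List.enumerate_cons]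
      simp only [List.flatMap_cons, List.getLast_cons hne, pvInter, List.append_assoc]
      simp [← ih hne (i + 1)]

theorem pvIntercalate_nil (l : List (List Char)) : ([] : List Char).intercalate l = l.flatten := by
  induction l with
  | nil => rfl
  | cons p ps ih => cases ps <;> simp_all [List.intercalate]

-- ===== VERDICT (by name: the statement is the Claim_ definition above) =====
theorem convert_placeholders_py_spec : Claim_equal_convert_placeholders_py := by
  intro sql style _
  unfold Spec_convert_placeholders_py convert_placeholders_py convert_placeholders_py_alt
  by_cases h1 : style = "format" || style = "pyformat"
  · simp [h1]
  · simp only [h1, Bool.false_eq_true, if_false]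
    by_cases h2 : style = "numeric"
    · simp only [h2, if_pos]
      rw [pvSplitOn_eq]
      by_cases hlen : (pvSp sql.toList).length = 1
      · rw [if_pos hlen, pvScanB_of_single sql.toList 1 hlen, String.ofList_toList]
      · rw [if_neg hlen]
        have hne : pvSp sql.toList ≠ [] := pvSp_ne_nil sql.toList
        have hpos : 1 ≤ (pvSp sql.toList).length := by
          cases h : pvSp sql.toList with
          | nil => exact absurd h hne
          | cons p ps => simp
        -- parts[:-1] = dropLast
        have hslice : PySem.List.slice (pvSp sql.toList) none (some (-1)) = (pvSp sql.toList).dropLast := by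
          simp only [PySem.List.slice, Int.reduceNeg, Order.lt_one_iff, PySem.List.clampIdx_neg_ofNat,
            tsub_zero, List.drop_zero]
          exact (List.dropLast_eq_take).symm
        -- parts[-1] = getLast
        have hlast : (PySem.List.pyGet? (pvSp sql.toList) (-1)).getD [] = (pvSp sql.toList).getLast hne := by
          simp only [PySem.List.pyGet?, PySem.List.pyIdx?, Int.reduceNeg, Int.neg_nonneg,
            Int.reduceLE, ↓reduceIte, neg_le_neg_iff, Nat.one_le_cast, neg_neg, Int.toNat_one,
            if_pos hpos, Option.bind_some]
          rw [List.getLast_eq_getElem]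
          rw [List.getElem?_eq_getElem (Nat.sub_lt (Nat.lt_of_lt_of_le Nat.zero_lt_one hpos) Nat.one_pos)]
          rfl
        rw [hslice, hlast,
          PySem.List.foldl_append_eq_flatMap (fun p : Int × List Char => [p.2, '$' :: PySem.Int.toChars p.1]) _ []]
        rw [List.nil_append, pvFlatMap_last_eq_inter (pvSp sql.toList) hne 1]
        rw [show PySem.Chars.join [] (pvInter (pvSp sql.toList) 1)
              = (pvInter (pvSp sql.toList) 1).flatten by
            simpa [PySem.Chars.join] using pvIntercalate_nil (pvInter (pvSp sql.toList) 1)]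
        rw [pvJoin_inter sql.toList 1]
    · simp [h2]
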